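-- pv_equiv track=rewrite | github.com/whoschek/bzfs | wbackup_zfs/wbackup_zfs.py | fix_solaris_raw_mode
-- ===== SOURCE A (Python) =====
-- from typing import List, Dict, Any, Tuple, Optional, Iterable, Set
--
-- def fix_solaris_raw_mode(lst: List[str]) -> List[str]:
--     lst = ["-w" if opt == "--raw" else opt for opt in lst]
--     lst = ["compress" if opt == "--compressed" else opt for opt in lst]
--     i = lst.index("-w") if "-w" in lst else -1
--     if i >= 0:
--         i += 1
--         if i == len(lst) or (lst[i] != "none" and lst[i] != "compress"):
--             lst.insert(i, "none")
--     return lst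
-- ===== SOURCE B (Python) =====
-- def fix_solaris_raw_mode(lst):
--     out = []
--     pending = False
--     seen = False
--     for opt in lst:
--         t = "-w" if opt == "--raw" else ("compress" if opt == "--compressed" else opt)
--         if pending and t != "none" and t != "compress":
--             out.append("none")
--         pending = False
--         out.append(t)
--         if t == "-w" and not seen:
--             pending = True
--             seen = True
--     if pending:
--         out.append("none")
--     return out
-- ===== Notes on version B (the rewrite author's own statement) =====
-- stated objective: alternative
-- what changed: Replaced A's two rewrite passes plus membership test, index search and list.insert with a single stateful traversal that translates flags inline and uses a pending/seen state to insert 'none' after the first -w.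
import Mathlib
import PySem

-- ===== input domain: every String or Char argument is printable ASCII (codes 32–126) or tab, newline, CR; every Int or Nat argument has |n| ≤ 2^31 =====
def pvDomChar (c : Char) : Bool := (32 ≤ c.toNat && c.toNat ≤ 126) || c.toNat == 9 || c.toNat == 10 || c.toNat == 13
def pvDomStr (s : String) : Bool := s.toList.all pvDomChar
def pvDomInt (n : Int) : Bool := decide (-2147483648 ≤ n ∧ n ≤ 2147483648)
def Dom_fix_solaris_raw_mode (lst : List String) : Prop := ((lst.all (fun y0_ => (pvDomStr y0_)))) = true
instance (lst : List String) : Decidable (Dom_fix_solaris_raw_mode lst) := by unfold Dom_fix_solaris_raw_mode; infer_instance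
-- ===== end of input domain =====

-- B replaces A's two rewrite passes plus index/insert with one stateful traversal
-- that rewrites the flags inline and tracks a 'pending' marker after the first -w
-- (objective: alternative decomposition; same asymptotic cost, single pass).

-- ===== PORT A =====
def fix_solaris_raw_mode (lst : List String) : List String :=
  let lst1 := lst.map (fun opt => if opt = "--raw" then "-w" else opt)
  let lst2 := lst1.map (fun opt => if opt = "--compressed" then "compress" else opt)
  let i : Int := if "-w" ∈ lst2 then (((PySem.List.index? lst2 "-w").getD 0 : Nat) : Int) else -1
  if i ≥ 0 then
    let j := i + 1
    if j = (lst2.length : Int) ∨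
        ((PySem.List.pyGet? lst2 j).getD "" ≠ "none" ∧ (PySem.List.pyGet? lst2 j).getD "" ≠ "compress") then
      PySem.List.insert lst2 j "none"
    else lst2
  else lst2

-- ===== PORT B =====
def fix_solaris_raw_mode_alt (lst : List String) : List String :=
  let fin := lst.foldl
    (fun (st : List String × Bool × Bool) opt =>
      let t := if opt = "--raw" then "-w" else if opt = "--compressed" then "compress" else opt
      let out := if st.2.1 ∧ t ≠ "none" ∧ t ≠ "compress" then st.1 ++ ["none"] else st.1
      let out := out ++ [t]
      if t = "-w" ∧ st.2.2 = false then (out, true, true) else (out, false, st.2.2))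
    ([], false, false)
  if fin.2.1 then fin.1 ++ ["none"] else fin.1

-- ===== PRECONDITION & SPEC =====
def Spec_fix_solaris_raw_mode (lst : List String) (out : List String) : Prop := out = fix_solaris_raw_mode_alt lst
instance (lst : List String) (out : List String) : Decidable (Spec_fix_solaris_raw_mode lst out) := by unfold Spec_fix_solaris_raw_mode; infer_instance

-- ===== CLAIM (what is proved, stated in full; the proofs are below) =====
def Claim_equal_fix_solaris_raw_mode : Prop := ∀ (lst : List String), Dom_fix_solaris_raw_mode lst → Spec_fix_solaris_raw_mode lst (fix_solaris_raw_mode lst)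

-- ===== LEMMAS AND PROOFS =====

/-- The combined flag translation both programs perform. -/
def pvTr (opt : String) : String :=
  if opt = "--raw" then "-w" else if opt = "--compressed" then "compress" else opt

/-- Spec of what happens after the first `-w` of the translated list. -/
def pvAfter : List String → List String
  | [] => ["none"]
  | x :: xs => if x = "none" ∨ x = "compress" then x :: xs else "none" :: x :: xs

/-- Spec of the whole result on the translated list. -/
def pvGo : List String → List String
  | [] => []
  | x :: xs => if x = "-w" then x :: pvAfter xs else x :: pvGo xs

theorem pvGo_of_not_mem (m : List String) (h : "-w" ∉ m) : pvGo m = m := by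
  induction m with
  | nil => rfl
  | cons x xs ih =>
    simp only [List.mem_cons, not_or] at h
    simp [pvGo, Ne.symm h.1, ih h.2]

theorem pvInsert_eq (xs : List String) (i : Int) (h0 : 0 ≤ i) (h1 : i ≤ xs.length) (v : String) :
    PySem.List.insert xs i v = xs.take i.toNat ++ v :: xs.drop i.toNat := by
  simp only [PySem.List.insert, PySem.List.sliceIndices]
  have hstep : ¬ (1 : Int) < 0 := by omega
  simp only [hstep, if_false, if_neg (by omega : ¬ i < 0)]
  have hmin : min i (xs.length : Int) = i := by omega
  rw [hmin]

theorem pvMap_eq (lst : List String) :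
    (lst.map (fun opt => if opt = "--raw" then "-w" else opt)).map
      (fun opt => if opt = "--compressed" then "compress" else opt) = lst.map pvTr := by
  rw [List.map_map]
  apply List.map_congr_left
  intro o _
  by_cases h1 : o = "--raw"
  · subst h1; rfl
  · by_cases h2 : o = "--compressed"
    · subst h2; rfl
    · simp [pvTr, h1, h2]

theorem pvGo_append_last (pre : List String) (hnm : "-w" ∉ pre) :
    pvGo (pre ++ ["-w"]) = pre ++ ["-w", "none"] := by
  induction pre with
  | nil => simp [pvGo, pvAfter]
  | cons p ps ih =>
    simp only [List.mem_cons, not_or] at hnm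
    simp only [List.cons_append, pvGo, if_neg (Ne.symm hnm.1)]
    rw [ih hnm.2]

theorem pvGo_append_mid (pre : List String) (suf : List String) (hnm : "-w" ∉ pre) :
    pvGo (pre ++ "-w" :: suf) = pre ++ "-w" :: pvAfter suf := by
  induction pre with
  | nil => simp [pvGo]
  | cons p ps ih =>
    simp only [List.mem_cons, not_or] at hnm
    simp only [List.cons_append, pvGo, if_neg (Ne.symm hnm.1)]
    rw [ih hnm.2]

theorem fix_A_eq_pvGo (lst : List String) : fix_solaris_raw_mode lst = pvGo (lst.map pvTr) := by
  simp only [fix_solaris_raw_mode]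
  rw [pvMap_eq]
  generalize (lst.map pvTr) = m
  by_cases hm : "-w" ∈ m
  · rw [if_pos hm]
    obtain ⟨k, hk⟩ : ∃ k, PySem.List.index? m "-w" = some k :=
      Option.isSome_iff_exists.mp (by rw [PySem.List.index?_isSome_iff]; exact hm)
    obtain ⟨pre, suf, hsplit, hlen, hnm⟩ := (PySem.List.index?_eq_some_iff m "-w" k).mp hk
    subst hsplit
    rw [hk]
    simp only [Option.getD_some]
    rw [if_pos (by exact_mod_cast Int.natCast_nonneg k)]
    cases suf with
    | nil =>
      have hlen2 : ((k:Int) + 1) = ((pre ++ ["-w"]).length : Int) := by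
        simp [← hlen]
      rw [if_pos (Or.inl hlen2)]
      rw [pvInsert_eq _ _ (by omega) (by simp [← hlen])]
      have ht : ((k:Int)+1).toNat = pre.length + 1 := by omega
      rw [ht, pvGo_append_last pre hnm]
      rw [show pre ++ ["-w"] = (pre ++ ["-w"]) ++ ([] : List String) by simp]
      rw [show pre.length + 1 = (pre ++ ["-w"]).length by simp]
      rw [List.take_left, List.drop_left]
      simp
    | cons y ys =>
      have hget : PySem.List.pyGet? (pre ++ "-w" :: y :: ys) ((k:Int)+1) = some y := by
        rw [show ((k:Int)+1) = (((pre ++ ["-w"]).length : Nat) : Int) by simp [← hlen]]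
        rw [show pre ++ "-w" :: y :: ys = (pre ++ ["-w"]) ++ y :: ys by simp]
        exact PySem.List.pyGet?_append_length _ _ _
      have hlenne : ¬ ((k:Int) + 1 = ((pre ++ "-w" :: y :: ys).length : Int)) := by
        simp [← hlen]; omega
      rw [pvGo_append_mid pre (y :: ys) hnm]
      by_cases hy : y = "none" ∨ y = "compress"
      · rw [if_neg]
        · simp [pvAfter, hy]
        · rw [hget]
          rcases hy with hy | hy <;> simp [hy] <;> omega
      · rw [not_or] at hy
        rw [if_pos (Or.inr (by rw [hget]; exact ⟨by simpa using hy.1, by simpa using hy.2⟩))]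
        rw [pvInsert_eq _ _ (by omega) (by simp [← hlen]; omega)]
        have ht : ((k:Int)+1).toNat = pre.length + 1 := by omega
        rw [ht]
        have h1 : (pre ++ "-w" :: y :: ys).take (pre.length + 1) = pre ++ ["-w"] := by
          rw [show pre ++ "-w" :: y :: ys = (pre ++ ["-w"]) ++ y :: ys by simp]
          rw [show pre.length + 1 = (pre ++ ["-w"]).length by simp]
          exact List.take_left
        have h2 : (pre ++ "-w" :: y :: ys).drop (pre.length + 1) = y :: ys := by
          rw [show pre ++ "-w" :: y :: ys = (pre ++ ["-w"]) ++ y :: ys by simp]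
          rw [show pre.length + 1 = (pre ++ ["-w"]).length by simp]
          exact List.drop_left
        rw [h1, h2]
        simp [pvAfter, hy.1, hy.2]
  · rw [if_neg hm, if_neg (by omega), pvGo_of_not_mem m hm]

/-- The fold step of port B, written without `let`s (definitionally equal). -/
def pvStep (st : List String × Bool × Bool) (opt : String) : List String × Bool × Bool :=
  if pvTr opt = "-w" ∧ st.2.2 = false then
    ((if st.2.1 ∧ pvTr opt ≠ "none" ∧ pvTr opt ≠ "compress" then st.1 ++ ["none"] else st.1)
      ++ [pvTr opt], true, true)
  else
    ((if st.2.1 ∧ pvTr opt ≠ "none" ∧ pvTr opt ≠ "compress" then st.1 ++ ["none"] else st.1)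
      ++ [pvTr opt], false, st.2.2)

/-- Finish the fold the way port B does. -/
def pvFin (st : List String × Bool × Bool) : List String :=
  if st.2.1 then st.1 ++ ["none"] else st.1

theorem pvFold_seen (xs : List String) (out : List String) :
    pvFin (xs.foldl pvStep (out, false, true)) = out ++ xs.map pvTr := by
  induction xs generalizing out with
  | nil => simp [pvFin]
  | cons x xs ih =>
    simp only [List.foldl_cons, pvStep]
    rw [if_neg (by simp), if_neg (by simp)]
    rw [ih]
    simp

theorem pvFold_pending (xs : List String) (out : List String) :
    pvFin (xs.foldl pvStep (out, true, true)) = out ++ pvAfter (xs.map pvTr) := by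
  cases xs with
  | nil => simp [pvFin, pvAfter]
  | cons x xs =>
    simp only [List.foldl_cons, pvStep, List.map_cons]
    rw [if_neg (by simp)]
    by_cases hx : pvTr x = "none" ∨ pvTr x = "compress"
    · rw [if_neg (by rcases hx with h | h <;> simp [h])]
      rw [pvFold_seen]
      simp [pvAfter, hx]
    · rw [not_or] at hx
      rw [if_pos (by simp [hx.1, hx.2])]
      rw [pvFold_seen]
      simp [pvAfter, hx.1, hx.2]

theorem pvFold_init (xs : List String) (out : List String) :
    pvFin (xs.foldl pvStep (out, false, false)) = out ++ pvGo (xs.map pvTr) := by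
  induction xs generalizing out with
  | nil => simp [pvFin, pvGo]
  | cons x xs ih =>
    simp only [List.foldl_cons, pvStep, List.map_cons]
    by_cases hx : pvTr x = "-w"
    · rw [if_pos (by simp [hx])]
      rw [if_neg (by simp)]
      rw [pvFold_pending]
      simp [pvGo, hx]
    · rw [if_neg (by simp [hx])]
      rw [if_neg (by simp)]
      rw [ih]
      simp [pvGo, hx]

theorem fix_B_eq_pvGo (lst : List String) : fix_solaris_raw_mode_alt lst = pvGo (lst.map pvTr) := by
  have h := pvFold_init lst []
  have hstep : (fun (st : List String × Bool × Bool) (opt : String) =>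
      let t := if opt = "--raw" then "-w" else if opt = "--compressed" then "compress" else opt
      let out := if st.2.1 ∧ t ≠ "none" ∧ t ≠ "compress" then st.1 ++ ["none"] else st.1
      let out := out ++ [t]
      if t = "-w" ∧ st.2.2 = false then (out, true, true) else (out, false, st.2.2)) = pvStep := by
    funext st opt
    simp only [pvStep, pvTr]
    by_cases h : (if opt = "--raw" then "-w" else if opt = "--compressed" then "compress" else opt) = "-w" ∧ st.2.2 = false
    · rw [if_pos h, if_pos h]
      rfl
    · rw [if_neg h, if_neg h]
      rfl
  simp only [fix_solaris_raw_mode_alt, hstep]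
  simpa [pvFin] using h

-- ===== VERDICT (by name: the statement is the Claim_ definition above) =====
theorem fix_solaris_raw_mode_spec : Claim_equal_fix_solaris_raw_mode := by
  intro lst _
  unfold Spec_fix_solaris_raw_mode
  rw [fix_A_eq_pvGo, fix_B_eq_pvGo]
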